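-- pv_equiv track=rewrite | github.com/Gauss-p/leetcode | 2025_10/leetcode2025-10-16.py | findSmallestInteger
-- ===== SOURCE A (Python) =====
-- from typing import List
-- from collections import defaultdict
--
-- def findSmallestInteger(nums: List[int], value: int) -> int:
--     # 首先分析操作后数组和原数组nums之间的共同特征，可以发现，由于操作后数组是在原数组的每一个数字上加或减去多个value，因此如果我们将nums和操作后数组的每一个数字都模除value，最后就会发现两个数组完全相等，因此，为了判断nums在操作后缺失的最小非负整数，就可以用一个数字从0开始模拟操作后数组，每一次判断nums中所有元素模除value后有没有和当前数字模除value后的值相等的，如果有，就将nums中对应值删除，否则就将当前数字返回，这就是缺失的数字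
--     # 注意，将nums中对应值删除可以用字典来做，用每个数字模除value后得到的值作为键，这样的值的个数作为值，那么每次就直接判断当前数字模除value在字典中对应的值是否大于0即可，只要大于0，就可以匹配到一个数字，将其值减1，否则就返回当前值即可
--     cnt = defaultdict(int)
--     for i in nums:
--         cnt[i%value] += 1
--     i = 0 # 模拟从0开始的非负整数
--     while True:
--         if cnt[i%value] == 0:
--             # 没有数字可以匹配
--             return i
--         cnt[i%value] -= 1
--         i += 1
-- ===== SOURCE B (Python) =====
-- from collections import Counter
--
-- def findSmallestInteger(nums, value):
--     # closed form: for residue s, the first missing non-negative integer congruent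
--     # to s is s + count(s)*|value|; the answer is the min over s (capped at len(nums)+1,
--     # past which some residue is empty and already gives a smaller candidate).
--     m = abs(value)
--     cnt = Counter(x % value for x in nums)
--     return min(s + cnt.get(s % value, 0) * m for s in range(min(m, len(nums) + 1)))
-- ===== Notes on version B (the rewrite author's own statement) =====
-- stated objective: alternative
-- what changed: Replaces A's step-by-step simulation of 0,1,2,... against a mutable residue-count dict with a closed form: build the residue Counter once and return min(s + cnt[s%value]*|value|) over residues s (capped at len(nums)+1), no simulation loop.
import Mathlib
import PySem

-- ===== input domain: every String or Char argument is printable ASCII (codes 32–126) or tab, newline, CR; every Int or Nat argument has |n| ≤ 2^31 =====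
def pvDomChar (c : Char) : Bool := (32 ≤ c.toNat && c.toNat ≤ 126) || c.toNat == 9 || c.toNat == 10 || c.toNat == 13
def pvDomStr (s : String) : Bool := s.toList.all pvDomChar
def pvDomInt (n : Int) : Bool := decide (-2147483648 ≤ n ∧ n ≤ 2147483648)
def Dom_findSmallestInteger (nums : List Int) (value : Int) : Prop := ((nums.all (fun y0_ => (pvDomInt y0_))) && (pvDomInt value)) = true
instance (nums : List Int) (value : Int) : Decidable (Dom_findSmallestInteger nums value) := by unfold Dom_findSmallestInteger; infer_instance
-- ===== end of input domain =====

-- B replaces A's 0,1,2,… simulation loop against a mutable residue-count dict by a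
-- one-pass closed form: min over residues s of s + cnt(s % value)·|value|.

-- ===== PORT A =====
-- A's 'while True' loop; the fuel (len(nums)+1)·|value| is proved sufficient below
-- (the 0 at fuel exhaustion is never reached on inputs satisfying Pre_)
def findSmallestIntegerLoop (value : Int) : Nat → PySem.Dict Int Int → Int → Int
  | 0, _, _ => 0
  | fuel+1, cnt, i =>
    if cnt.getD (PySem.Int.mod i value) 0 = 0 then i
    else findSmallestIntegerLoop value fuel
          (cnt.modify (PySem.Int.mod i value) 0 (fun x => x - 1)) (i + 1)

def findSmallestInteger (nums : List Int) (value : Int) : Int :=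
  let cnt := nums.foldl (fun d x => d.modify (PySem.Int.mod x value) 0 (fun y => y + 1)) PySem.Dict.empty
  findSmallestIntegerLoop value ((nums.length + 1) * value.natAbs) cnt 0

-- ===== PORT B =====
def findSmallestInteger_alt (nums : List Int) (value : Int) : Int :=
  let m : Int := (value.natAbs : Int)
  let cnt : PySem.Dict Int Int := PySem.Dict.counter (nums.map (fun x => PySem.Int.mod x value))
  let M : Int := min m ((nums.length : Int) + 1)
  (PySem.List.min? ((PySem.List.pyRange 0 M 1).map
      (fun s => s + cnt.getD (PySem.Int.mod s value) 0 * m)) (fun y => y)).getD 0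

-- ===== PRECONDITION & SPEC =====
-- Pre_ excludes exactly value = 0, where Python A raises ZeroDivisionError
def Pre_findSmallestInteger (nums : List Int) (value : Int) : Prop := value ≠ 0
instance (nums : List Int) (value : Int) : Decidable (Pre_findSmallestInteger nums value) := by
  unfold Pre_findSmallestInteger; infer_instance
def pvWitness_findSmallestInteger : List Int × Int := ([1, 2, 4], 2)

def Spec_findSmallestInteger (nums : List Int) (value : Int) (out : Int) : Prop := out = findSmallestInteger_alt nums value
instance (nums : List Int) (value : Int) (out : Int) : Decidable (Spec_findSmallestInteger nums value out) := by unfold Spec_findSmallestInteger; infer_instance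

-- ===== CLAIM (what is proved, stated in full; the proofs are below) =====
def Claim_equal_findSmallestInteger : Prop := ∀ (nums : List Int) (value : Int), Dom_findSmallestInteger nums value → Pre_findSmallestInteger nums value → Spec_findSmallestInteger nums value (findSmallestInteger nums value)

-- ===== LEMMAS AND PROOFS =====

-- the residue-count function both programs really compute with
def resCnt (nums : List Int) (v : Int) : Int → Int :=
  fun r => ((nums.map (fun x => PySem.Int.mod x v)).count r : Int)

-- pure-function mirror of A's loop (the dict replaced by its getD function)
def auxLoop (v : Int) : Nat → (Int → Int) → Int → Int
  | 0, _, _ => 0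
  | fuel+1, c, i =>
    if c (PySem.Int.mod i v) = 0 then i
    else auxLoop v fuel (fun r => if r = PySem.Int.mod i v then c r - 1 else c r) (i + 1)

-- the closed-form value: min over one period of residues starting at i
def Fval (v : Int) (c : Int → Int) (i : Int) : Int :=
  Finset.inf' (insert 0 (Finset.range v.natAbs)) (Finset.insert_nonempty _ _)
    (fun t => (t : Int) + c (PySem.Int.mod (i + (t : Int)) v) * (v.natAbs : Int))

lemma dvd_small_eq (m d : Int) (hm : 0 < m) (h : m ∣ d) (h1 : -m < d) (h2 : d < m) : d = 0 := by
  obtain ⟨k, rfl⟩ := h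
  rcases lt_trichotomy k 0 with hk | hk | hk
  · nlinarith
  · simp [hk]
  · nlinarith

lemma pmod_dvd_sub (a v : Int) : v ∣ (a - PySem.Int.mod a v) := by
  refine ⟨PySem.Int.floordiv a v, ?_⟩
  have := PySem.Int.floordiv_mul_add_mod a v
  linarith [this]

lemma pmod_eq_pmod_iff (a b v : Int) (hv : v ≠ 0) :
    PySem.Int.mod a v = PySem.Int.mod b v ↔ v ∣ (a - b) := by
  constructor
  · intro h
    have ha := pmod_dvd_sub a v
    have hb := pmod_dvd_sub b v
    have he : a - b = (a - PySem.Int.mod a v) - (b - PySem.Int.mod b v) := by rw [h]; ring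
    rw [he]; exact dvd_sub ha hb
  · intro h
    have ha := pmod_dvd_sub a v
    have hb := pmod_dvd_sub b v
    have hd : v ∣ (PySem.Int.mod a v - PySem.Int.mod b v) := by
      have he : PySem.Int.mod a v - PySem.Int.mod b v
          = (a - b) - (a - PySem.Int.mod a v) + (b - PySem.Int.mod b v) := by ring
      rw [he]; exact dvd_add (dvd_sub h ha) hb
    have hdm : ((v.natAbs : Int)) ∣ (PySem.Int.mod a v - PySem.Int.mod b v) := by
      rwa [Int.natAbs_dvd]
    have hm : (0 : Int) < (v.natAbs : Int) := by
      have := Int.natAbs_ne_zero.mpr hv; omega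
    rcases lt_or_gt_of_ne hv with hneg | hpos
    · have b1 := PySem.Int.mod_neg_bounds a hneg
      have b2 := PySem.Int.mod_neg_bounds b hneg
      have hveq : (v.natAbs : Int) = -v := by
        rw [← Int.abs_eq_natAbs]; exact abs_of_neg hneg
      have := dvd_small_eq _ _ hm hdm (by omega) (by omega)
      omega
    · have a1 := PySem.Int.mod_nonneg a hpos
      have a2 := PySem.Int.mod_lt a hpos
      have b1 := PySem.Int.mod_nonneg b hpos
      have b2 := PySem.Int.mod_lt b hpos
      have hveq : (v.natAbs : Int) = v := by
        rw [← Int.abs_eq_natAbs]; exact abs_of_pos hpos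
      have := dvd_small_eq _ _ hm hdm (by omega) (by omega)
      omega

lemma pmod_period (i v : Int) (hv : v ≠ 0) :
    PySem.Int.mod (i + (v.natAbs : Int)) v = PySem.Int.mod i v := by
  rw [pmod_eq_pmod_iff _ _ _ hv]
  have he : i + (v.natAbs : Int) - i = (v.natAbs : Int) := by ring
  rw [he]
  exact Int.dvd_natAbs.mpr dvd_rfl

lemma pmod_shift_ne (i v : Int) (hv : v ≠ 0) (t : Nat) (ht0 : 0 < t) (ht : t < v.natAbs) :
    PySem.Int.mod (i + (t : Int)) v ≠ PySem.Int.mod i v := by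
  intro h
  rw [pmod_eq_pmod_iff _ _ _ hv] at h
  have he : i + (t : Int) - i = (t : Int) := by ring
  rw [he] at h
  have hdm : ((v.natAbs : Int)) ∣ (t : Int) := by rwa [Int.natAbs_dvd]
  have hm : (0 : Int) < (v.natAbs : Int) := by
    have := Int.natAbs_ne_zero.mpr hv; omega
  have := dvd_small_eq _ _ hm hdm (by omega) (by exact_mod_cast ht)
  omega

-- A's built dict reads back as the residue count
lemma build_getD (nums : List Int) (v : Int) (r : Int) :
    (nums.foldl (fun d x => d.modify (PySem.Int.mod x v) 0 (fun y => y + 1)) PySem.Dict.empty).getD r 0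
      = resCnt nums v r := by
  have h := List.foldl_map (f := fun x => PySem.Int.mod x v)
      (g := fun (d : PySem.Dict Int Int) x => d.modify x 0 (fun y => y + 1))
      (l := nums) (init := PySem.Dict.empty)
  rw [resCnt, ← h, PySem.Dict.getD_foldl_modify_add_one]
  have h0 : (PySem.Dict.empty : PySem.Dict Int Int).getD r 0 = 0 := rfl
  rw [h0]
  omega

lemma loop_bridge (v : Int) : ∀ (fuel : Nat) (d : PySem.Dict Int Int) (i : Int),
    findSmallestIntegerLoop v fuel d i = auxLoop v fuel (fun r => d.getD r 0) i := by
  intro fuel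
  induction fuel with
  | zero => intro d i; rfl
  | succ n ih =>
    intro d i
    simp only [findSmallestIntegerLoop, auxLoop]
    split_ifs with h
    · rfl
    · rw [ih]
      congr 1
      funext r
      rw [PySem.Dict.getD_modify]
      split_ifs with hr
      · rw [hr]
      · rfl

lemma Fval_nonneg (v : Int) (c : Int → Int) (i : Int) (hc : ∀ r, 0 ≤ c r) : 0 ≤ Fval v c i := by
  rw [Fval]
  apply Finset.le_inf'
  intro t _
  have := hc (PySem.Int.mod (i + (t : Int)) v)
  positivity

lemma Fval_le (v : Int) (c : Int → Int) (i : Int) (t : Nat) (ht : t = 0 ∨ t < v.natAbs) :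
    Fval v c i ≤ (t : Int) + c (PySem.Int.mod (i + (t : Int)) v) * (v.natAbs : Int) := by
  rw [Fval]
  exact Finset.inf'_le _ (by simp [Finset.mem_insert, Finset.mem_range]; omega)

lemma Fval_zero (v : Int) (c : Int → Int) (i : Int) (hc : ∀ r, 0 ≤ c r)
    (h0 : c (PySem.Int.mod i v) = 0) : Fval v c i = 0 := by
  have h1 := Fval_nonneg v c i hc
  have h2 := Fval_le v c i 0 (Or.inl rfl)
  simp [h0] at h2
  omega

-- min over one period is invariant (−1) under the rotation t ↦ t+1 mod m
lemma inf'_rot (m : Nat) (hm : 0 < m) (f f' : Nat → Int)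
    (corr : ∀ u : Nat, u < m → f' u = f (if u = m - 1 then 0 else u + 1) - 1) :
    Finset.inf' (insert 0 (Finset.range m)) (Finset.insert_nonempty _ _) f'
      = Finset.inf' (insert 0 (Finset.range m)) (Finset.insert_nonempty _ _) f - 1 := by
  have hmem : ∀ t : Nat, t < m → t ∈ insert 0 (Finset.range m) := by
    intro t ht; simp [Finset.mem_insert, Finset.mem_range]; omega
  apply le_antisymm
  · obtain ⟨t, htS, hft⟩ := Finset.exists_mem_eq_inf' (Finset.insert_nonempty 0 (Finset.range m)) f
    have htm : t < m := by
      rcases Finset.mem_insert.mp htS with h | h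
      · omega
      · exact Finset.mem_range.mp h
    by_cases ht0 : t = 0
    · have h1 : f' (m - 1) = f t - 1 := by
        have := corr (m - 1) (by omega)
        simpa [ht0] using this
      calc Finset.inf' _ (Finset.insert_nonempty 0 (Finset.range m)) f' ≤ f' (m - 1) :=
            Finset.inf'_le _ (hmem _ (by omega))
        _ = f t - 1 := h1
        _ = _ := by rw [hft]
    · have h1 : f' (t - 1) = f t - 1 := by
        have := corr (t - 1) (by omega)
        have hne : ¬ (t - 1 = m - 1) := by omega
        have he : t - 1 + 1 = t := by omega
        simpa [hne, he] using this
      calc Finset.inf' _ (Finset.insert_nonempty 0 (Finset.range m)) f' ≤ f' (t - 1) :=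
            Finset.inf'_le _ (hmem _ (by omega))
        _ = f t - 1 := h1
        _ = _ := by rw [hft]
  · obtain ⟨u, huS, hfu⟩ := Finset.exists_mem_eq_inf' (Finset.insert_nonempty 0 (Finset.range m)) f'
    have hum : u < m := by
      rcases Finset.mem_insert.mp huS with h | h
      · omega
      · exact Finset.mem_range.mp h
    by_cases hu1 : u = m - 1
    · have h2 : Finset.inf' _ (Finset.insert_nonempty 0 (Finset.range m)) f ≤ f 0 :=
        Finset.inf'_le _ (hmem _ hm)
      rw [hfu, corr u hum, if_pos hu1]
      omega
    · have h2 : Finset.inf' _ (Finset.insert_nonempty 0 (Finset.range m)) f ≤ f (u + 1) :=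
        Finset.inf'_le _ (hmem _ (by omega))
      rw [hfu, corr u hum, if_neg hu1]
      omega

lemma Fval_step (v : Int) (c : Int → Int) (i : Int) (hv : v ≠ 0)
    (h0 : c (PySem.Int.mod i v) ≠ 0) :
    Fval v (fun r => if r = PySem.Int.mod i v then c r - 1 else c r) (i + 1) = Fval v c i - 1 := by
  have hm : 0 < v.natAbs := Int.natAbs_pos.mpr hv
  rw [Fval, Fval]
  apply inf'_rot _ hm
  intro u hu
  by_cases hum : u = v.natAbs - 1
  · have hcast : ((u : Nat) : Int) = (v.natAbs : Int) - 1 := by omega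
    have harg : (i + 1) + ((u : Nat) : Int) = i + (v.natAbs : Int) := by rw [hcast]; ring
    rw [if_pos hum, harg, pmod_period i v hv]
    simp only [Nat.cast_zero, add_zero, eq_self_iff_true, if_true]
    rw [hcast]
    ring
  · have ht0 : 0 < u + 1 := by omega
    have ht : u + 1 < v.natAbs := by omega
    have harg : (i + 1) + ((u : Nat) : Int) = i + ((u + 1 : Nat) : Int) := by push_cast; ring
    rw [if_neg hum, harg]
    have hne := pmod_shift_ne i v hv (u + 1) ht0 ht
    simp only [if_neg hne]
    push_cast
    ring

-- A's loop equals i + the closed form, given enough fuel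
lemma auxLoop_eq (v : Int) (hv : v ≠ 0) : ∀ (fuel : Nat) (c : Int → Int) (i : Int),
    (∀ r, 0 ≤ c r) → Fval v c i < fuel → auxLoop v fuel c i = i + Fval v c i := by
  intro fuel
  induction fuel with
  | zero =>
    intro c i hc hf
    have := Fval_nonneg v c i hc
    simp at hf
    omega
  | succ n ih =>
    intro c i hc hf
    simp only [auxLoop]
    split_ifs with h
    · rw [Fval_zero v c i hc h]; ring
    · have hstep := Fval_step v c i hv h
      have hc' : ∀ r, 0 ≤ (fun r => if r = PySem.Int.mod i v then c r - 1 else c r) r := by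
        intro r
        by_cases hr : r = PySem.Int.mod i v
        · have := hc (PySem.Int.mod i v); simp [hr]; omega
        · simp [hr]; exact hc r
      rw [ih _ (i + 1) hc' (by push_cast at hf ⊢; omega), hstep]
      ring

-- pigeonhole: with more residue slots than elements, some residue class in [0, n+1) is empty
lemma pigeonhole (nums : List Int) (v : Int) (hv : v ≠ 0)
    (hbig : nums.length + 1 ≤ v.natAbs) :
    ∃ s : Nat, s < nums.length + 1 ∧ resCnt nums v (PySem.Int.mod (s : Int) v) = 0 := by
  by_contra hcon
  push_neg at hcon
  have hmem : ∀ s : Nat, s < nums.length + 1 →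
      PySem.Int.mod (s : Int) v ∈ nums.map (fun x => PySem.Int.mod x v) := by
    intro s hs
    have := hcon s hs
    rw [resCnt] at this
    have hne : (nums.map (fun x => PySem.Int.mod x v)).count (PySem.Int.mod (s : Int) v) ≠ 0 := by
      intro h; rw [h] at this; simp at this
    exact List.count_pos_iff.mp (Nat.pos_of_ne_zero hne)
  have hinj : Set.InjOn (fun s : Nat => PySem.Int.mod (s : Int) v) (Finset.range (nums.length + 1)) := by
    intro s hs t ht h
    simp only [Finset.coe_range, Set.mem_Iio] at hs ht
    rw [pmod_eq_pmod_iff _ _ _ hv] at h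
    have hdm : ((v.natAbs : Int)) ∣ ((s : Int) - t) := by rwa [Int.natAbs_dvd]
    have hmI : (0 : Int) < (v.natAbs : Int) := by
      have := Int.natAbs_ne_zero.mpr hv; omega
    have := dvd_small_eq _ _ hmI hdm (by omega) (by omega)
    omega
  have hcard : ((Finset.range (nums.length + 1)).image (fun s : Nat => PySem.Int.mod (s : Int) v)).card
      = nums.length + 1 := by
    rw [Finset.card_image_of_injOn hinj, Finset.card_range]
  have hsub : (Finset.range (nums.length + 1)).image (fun s : Nat => PySem.Int.mod (s : Int) v)
      ⊆ (nums.map (fun x => PySem.Int.mod x v)).toFinset := by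
    intro r hr
    simp only [Finset.mem_image, Finset.mem_range] at hr
    obtain ⟨s, hs, rfl⟩ := hr
    exact List.mem_toFinset.mpr (hmem s hs)
  have h1 := Finset.card_le_card hsub
  have h2 := List.toFinset_card_le (nums.map (fun x => PySem.Int.mod x v))
  simp only [List.length_map] at h2
  omega

-- B's counter reads back as the residue count
lemma counter_getD (nums : List Int) (v : Int) (r : Int) :
    (PySem.Dict.counter (nums.map (fun x => PySem.Int.mod x v))).getD r 0 = resCnt nums v r := by
  rw [PySem.Dict.counter_eq_foldl, PySem.Dict.getD_foldl_modify_add_one, resCnt]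
  have h0 : (PySem.Dict.empty : PySem.Dict Int Int).getD r 0 = 0 := rfl
  rw [h0]
  omega

lemma resCnt_nonneg (nums : List Int) (v : Int) : ∀ r, 0 ≤ resCnt nums v r := by
  intro r; rw [resCnt]; positivity

lemma resCnt_le (nums : List Int) (v : Int) (r : Int) : resCnt nums v r ≤ (nums.length : Int) := by
  rw [resCnt]
  have := List.count_le_length (l := nums.map (fun x => PySem.Int.mod x v)) (a := r)
  simp only [List.length_map] at this
  exact_mod_cast this

-- B equals the closed form
lemma alt_eq_Fval (nums : List Int) (v : Int) (hv : v ≠ 0) :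
    findSmallestInteger_alt nums v = Fval v (resCnt nums v) 0 := by
  have hm : 0 < v.natAbs := Int.natAbs_pos.mpr hv
  have hmI : (0 : Int) < (v.natAbs : Int) := by exact_mod_cast hm
  simp only [findSmallestInteger_alt]
  set c := resCnt nums v with hc
  set mI : Int := (v.natAbs : Int) with hmIdef
  set M : Int := min mI ((nums.length : Int) + 1) with hM
  have hM1 : 1 ≤ M := by
    rw [hM]; apply le_min hmI; omega
  set Mn : Nat := M.toNat with hMn
  have hMn1 : 0 < Mn := by omega
  have hMncast : (Mn : Int) = M := by omega
  have hMnle : Mn ≤ v.natAbs := by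
    have : M ≤ mI := min_le_left _ _
    omega
  -- the list B takes the min of
  have hrange : PySem.List.pyRange 0 M 1 = (List.range Mn).map (fun k : Nat => (k : Int)) := by
    rw [PySem.List.pyRange_one]
    simp [hMn]
  set g : Nat → Int := fun k => (k : Int) + c (PySem.Int.mod (k : Int) v) * mI with hg
  have hlist : (PySem.List.pyRange 0 M 1).map
      (fun s => s + (PySem.Dict.counter (nums.map (fun x => PySem.Int.mod x v))).getD (PySem.Int.mod s v) 0 * mI)
      = (List.range Mn).map g := by
    rw [hrange, List.map_map]
    apply List.map_congr_left
    intro k _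
    simp only [Function.comp, hg, counter_getD, hc]
  rw [hlist]
  -- characterise min?
  have hnil : (List.range Mn).map g ≠ [] := by
    simp [List.map_eq_nil_iff, List.range_eq_nil]
    omega
  rcases hmin : PySem.List.min? ((List.range Mn).map g) (fun y => y) with _ | w
  · exact absurd ((PySem.List.min?_eq_none_iff _ _).mp hmin) hnil
  · simp only [Option.getD_some]
    have hwmem := PySem.List.min?_mem hmin
    have hwmin := PySem.List.min?_isMin hmin
    obtain ⟨k0, hk0, hk0w⟩ := List.mem_map.mp hwmem
    rw [List.mem_range] at hk0
    -- Fval ≤ w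
    have hFw : Fval v c 0 ≤ w := by
      rw [← hk0w]
      have h := Fval_le v c 0 k0 (Or.inr (by omega))
      rw [zero_add] at h
      exact h
    -- w ≤ Fval
    have hwF : w ≤ Fval v c 0 := by
      obtain ⟨t, htS, hft⟩ := Finset.exists_mem_eq_inf'
        (Finset.insert_nonempty 0 (Finset.range v.natAbs))
        (fun t : Nat => (t : Int) + c (PySem.Int.mod (0 + (t : Int)) v) * (v.natAbs : Int))
      have htm : t < v.natAbs := by
        rcases Finset.mem_insert.mp htS with h | h
        · omega
        · exact Finset.mem_range.mp h
      have hFt : Fval v c 0 = (t : Int) + c (PySem.Int.mod (t : Int) v) * mI := by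
        simp only [Fval]
        rw [hft, zero_add]
      by_cases hts : t < Mn
      · have : g t ∈ (List.range Mn).map g := List.mem_map.mpr ⟨t, List.mem_range.mpr hts, rfl⟩
        have := hwmin _ this
        simp only [hg] at this
        rw [hFt]
        exact this
      · -- t ≥ Mn forces M = n+1; pigeonhole gives an empty class below n+1
        have hMne : Mn < v.natAbs := by omega
        have hMeq : M = (nums.length : Int) + 1 := by
          rcases min_cases mI ((nums.length : Int) + 1) with ⟨h1, h2⟩ | ⟨h1, h2⟩
          · omega
          · omega
        have hbig : nums.length + 1 ≤ v.natAbs := by omega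
        obtain ⟨s, hs, hzero⟩ := pigeonhole nums v hv hbig
        have hsMn : s < Mn := by omega
        have hgs : g s = (s : Int) := by
          simp [hg, hc, hzero]
        have hmem : g s ∈ (List.range Mn).map g := List.mem_map.mpr ⟨s, List.mem_range.mpr hsMn, rfl⟩
        have hws := hwmin _ hmem
        simp only at hws
        have hct : 0 ≤ c (PySem.Int.mod (t : Int) v) := resCnt_nonneg nums v _
        have : w ≤ (s : Int) := by rw [← hgs]; exact hws
        rw [hFt]
        have : ((s : Int)) ≤ (t : Int) := by omega
        nlinarith [hct, hmI]
    omega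

-- ===== VERDICT (by name: the statement is the Claim_ definition above) =====
theorem findSmallestInteger_spec : Claim_equal_findSmallestInteger := by
  intro nums v _ hv
  unfold Spec_findSmallestInteger
  rw [alt_eq_Fval nums v hv]
  simp only [findSmallestInteger]
  rw [loop_bridge]
  have hfun : (fun r => (nums.foldl (fun d x => d.modify (PySem.Int.mod x v) 0 (fun y => y + 1)) PySem.Dict.empty).getD r 0)
      = resCnt nums v := by
    funext r; exact build_getD nums v r
  rw [hfun]
  have hm : 0 < v.natAbs := Int.natAbs_pos.mpr hv
  have hfuel : Fval v (resCnt nums v) 0 < ((nums.length + 1) * v.natAbs : Nat) := by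
    have h1 := Fval_le v (resCnt nums v) 0 0 (Or.inl rfl)
    simp only [Nat.cast_zero, add_zero, zero_add] at h1
    have h2 := resCnt_le nums v (PySem.Int.mod 0 v)
    have hmI : (0 : Int) < (v.natAbs : Int) := by exact_mod_cast hm
    have h3 : resCnt nums v (PySem.Int.mod 0 v) * (v.natAbs : Int)
        ≤ (nums.length : Int) * (v.natAbs : Int) := by
      apply mul_le_mul_of_nonneg_right h2 (le_of_lt hmI)
    have h4 : ((((nums.length + 1) * v.natAbs : Nat)) : Int)
        = ((nums.length : Int) + 1) * (v.natAbs : Int) := by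
      simp only [Nat.cast_mul, Nat.cast_add, Nat.cast_one]
    rw [h4]
    nlinarith
  rw [auxLoop_eq v hv _ _ 0 (resCnt_nonneg nums v) hfuel]
  ring
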